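-- pv_equiv track=rewrite | github.com/JetBrains-Research/codeformer | jetnn/data_processing/tree_representation/my_text_tree.py | split_big_leaves
-- ===== SOURCE A (Python) =====
-- def split_big_leaves(sequence_split, max_subtree_size):
--     result = list()
--     for split in sequence_split:
--         if split <= max_subtree_size:
--             result.append(split)
--         else:
--             while split > max_subtree_size:
--                 result.append(max_subtree_size)
--                 split -= max_subtree_size
--             result.append(split)
--     return result
-- ===== SOURCE B (Python) =====
-- def split_big_leaves(sequence_split, max_subtree_size):
--     result = []
--     for split in sequence_split:
--         if split <= max_subtree_size:
--             result.append(split)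
--         else:
--             q, r = divmod(split, max_subtree_size)
--             result.extend([max_subtree_size] * q)
--             if r != 0:
--                 result.append(r)
--     return result
-- ===== Notes on version B (the rewrite author's own statement) =====
-- stated objective: simpler
-- what changed: Replaces the repeated-subtraction while loop that emits one chunk per iteration with a closed-form divmod: extend with q full chunks at once and append the remainder only when nonzero.
import Mathlib
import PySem

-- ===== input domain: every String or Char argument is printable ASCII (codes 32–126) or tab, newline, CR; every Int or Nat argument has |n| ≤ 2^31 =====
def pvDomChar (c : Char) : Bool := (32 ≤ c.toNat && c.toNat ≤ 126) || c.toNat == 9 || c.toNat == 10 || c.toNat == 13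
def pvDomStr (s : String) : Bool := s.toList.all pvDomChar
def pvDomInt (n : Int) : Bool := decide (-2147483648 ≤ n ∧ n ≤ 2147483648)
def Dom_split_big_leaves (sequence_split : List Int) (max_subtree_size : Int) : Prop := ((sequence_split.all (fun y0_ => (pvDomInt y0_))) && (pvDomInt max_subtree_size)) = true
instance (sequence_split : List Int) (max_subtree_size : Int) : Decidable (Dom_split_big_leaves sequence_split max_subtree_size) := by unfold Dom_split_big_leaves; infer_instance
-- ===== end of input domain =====

-- B replaces A's repeated-subtraction while loop with one closed-form divmod per oversized leaf (simpler); return values agree on Pre_.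

-- ===== PORT A =====
-- the inner 'while split > max: append max; split -= max' then 'append split';
-- the '0 < max' conjunct only makes the recursion total (A diverges when it fails, excluded by Pre_)
def pvWhileA (split max_subtree_size : Int) (result : List Int) : List Int :=
  if _h : 0 < max_subtree_size ∧ max_subtree_size < split then
    pvWhileA (split - max_subtree_size) max_subtree_size (result ++ [max_subtree_size])
  else
    result ++ [split]
termination_by (split - max_subtree_size).toNat
decreasing_by omega

def split_big_leaves (sequence_split : List Int) (max_subtree_size : Int) : List Int :=
  sequence_split.foldl (fun result split =>
    if split ≤ max_subtree_size then result ++ [split]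
    else pvWhileA split max_subtree_size result) []

-- ===== PORT B =====
def split_big_leaves_alt (sequence_split : List Int) (max_subtree_size : Int) : List Int :=
  sequence_split.foldl (fun result split =>
    if split ≤ max_subtree_size then result ++ [split]
    else
      let q := PySem.Int.floordiv split max_subtree_size
      let r := PySem.Int.mod split max_subtree_size
      result ++ List.replicate q.toNat max_subtree_size ++ (if r ≠ 0 then [r] else [])) []

-- ===== PRECONDITION & SPEC =====
-- Pre_ excludes exactly the inputs where A never returns: some element exceeds
-- max_subtree_size while max_subtree_size ≤ 0, so A's while loop runs forever
-- (and Python B's divmod raises for max_subtree_size == 0).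
def Pre_split_big_leaves (sequence_split : List Int) (max_subtree_size : Int) : Prop :=
  ∀ s ∈ sequence_split, max_subtree_size < s → 0 < max_subtree_size
instance (sequence_split : List Int) (max_subtree_size : Int) : Decidable (Pre_split_big_leaves sequence_split max_subtree_size) := by unfold Pre_split_big_leaves; infer_instance
def pvWitness_split_big_leaves : List Int × Int := ([7, 2, 6, 0], 3)

def Spec_split_big_leaves (sequence_split : List Int) (max_subtree_size : Int) (out : List Int) : Prop := out = split_big_leaves_alt sequence_split max_subtree_size
instance (sequence_split : List Int) (max_subtree_size : Int) (out : List Int) : Decidable (Spec_split_big_leaves sequence_split max_subtree_size out) := by unfold Spec_split_big_leaves; infer_instance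

-- ===== CLAIM (what is proved, stated in full; the proofs are below) =====
def Claim_equal_split_big_leaves : Prop := ∀ (sequence_split : List Int) (max_subtree_size : Int), Dom_split_big_leaves sequence_split max_subtree_size → Pre_split_big_leaves sequence_split max_subtree_size → Spec_split_big_leaves sequence_split max_subtree_size (split_big_leaves sequence_split max_subtree_size)

-- ===== LEMMAS AND PROOFS =====

-- A's while loop equals q full chunks plus the nonzero remainder, in closed form.
lemma pvWhileA_eq (split max_subtree_size : Int) (result : List Int)
    (hm : 0 < max_subtree_size) (hs : max_subtree_size < split) :
    pvWhileA split max_subtree_size result =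
      result ++ List.replicate (PySem.Int.floordiv split max_subtree_size).toNat max_subtree_size
             ++ (if PySem.Int.mod split max_subtree_size ≠ 0 then [PySem.Int.mod split max_subtree_size] else []) := by
  rw [pvWhileA]
  rw [dif_pos ⟨hm, hs⟩]
  by_cases h2 : max_subtree_size < split - max_subtree_size
  · rw [pvWhileA_eq (split - max_subtree_size) max_subtree_size (result ++ [max_subtree_size]) hm h2]
    have hdiv : PySem.Int.floordiv (split - max_subtree_size) max_subtree_size
        = PySem.Int.floordiv split max_subtree_size - 1 := by
      rw [PySem.Int.floordiv_eq_ediv_of_pos hm, PySem.Int.floordiv_eq_ediv_of_pos hm]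
      rw [show split - max_subtree_size = split + (-1) * max_subtree_size by ring]
      rw [Int.add_mul_ediv_right _ _ (by omega : max_subtree_size ≠ 0)]
      ring
    have hmod : PySem.Int.mod (split - max_subtree_size) max_subtree_size
        = PySem.Int.mod split max_subtree_size := by
      rw [PySem.Int.mod_eq_emod_of_pos hm, PySem.Int.mod_eq_emod_of_pos hm]
      exact Int.sub_emod_right split max_subtree_size
    have hq1 : 1 ≤ PySem.Int.floordiv split max_subtree_size := by
      rw [PySem.Int.le_floordiv_iff_mul_le hm]; omega
    rw [hdiv, hmod]
    have : (PySem.Int.floordiv split max_subtree_size - 1).toNat + 1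
        = (PySem.Int.floordiv split max_subtree_size).toNat := by omega
    rw [show (PySem.Int.floordiv split max_subtree_size).toNat
          = (PySem.Int.floordiv split max_subtree_size - 1).toNat + 1 from this.symm]
    simp [List.replicate_succ]
  · -- last iteration: max < split ≤ 2*max
    rw [pvWhileA]
    rw [dif_neg (by omega)]
    have hq : PySem.Int.floordiv split max_subtree_size
        = if split = 2 * max_subtree_size then 2 else 1 := by
      split_ifs with he
      · rw [PySem.Int.floordiv_eq_iff_of_pos hm]; constructor <;> omega
      · rw [PySem.Int.floordiv_eq_iff_of_pos hm]; constructor <;> omega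
    have hr : PySem.Int.mod split max_subtree_size
        = if split = 2 * max_subtree_size then 0 else split - max_subtree_size := by
      have := PySem.Int.floordiv_mul_add_mod split max_subtree_size
      rw [hq] at this
      split_ifs at * <;> omega
    rw [hq, hr]
    split_ifs with he h3 <;> simp_all <;> omega
termination_by (split - max_subtree_size).toNat
decreasing_by omega

-- ===== VERDICT (by name: the statement is the Claim_ definition above) =====
theorem split_big_leaves_spec : Claim_equal_split_big_leaves := by
  intro seq m hdom hpre
  unfold Spec_split_big_leaves split_big_leaves split_big_leaves_alt
  induction seq using List.reverseRecOn with
  | nil => rfl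
  | append_singleton xs x ih =>
    have hpre' : Pre_split_big_leaves xs m := fun s hs => hpre s (by simp [hs])
    have hdom' : Dom_split_big_leaves xs m := by
      revert hdom; unfold Dom_split_big_leaves; simp; tauto
    rw [List.foldl_append, List.foldl_append, ih hdom' hpre']
    simp only [List.foldl_cons, List.foldl_nil]
    by_cases hx : x ≤ m
    · simp [hx]
    · have hm : 0 < m := hpre x (by simp) (by omega)
      rw [if_neg hx, if_neg hx]
      exact pvWhileA_eq x m _ hm (by omega)
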